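-- pv_equiv track=rewrite | github.com/SYSU-Wang-LAB/m6Aiso | m6Aiso/utils/dataload_utils.py | motif2readname_dict_make
-- ===== SOURCE A (Python) =====
-- def motif2readname_dict_make(read_name_list):
-- 	outdict = {}
-- 	outlist = []
-- 	for name in read_name_list:
-- 		motif = name.split("_")[0]
-- 		try:
-- 			outdict[motif].append(name)
-- 		except:
-- 			outdict[motif] = [name]
-- 			outlist.append(motif)
-- 	return outdict,outlist
-- ===== SOURCE B (Python) =====
-- def motif2readname_dict_make(read_name_list):
-- 	motifs = [name.split("_")[0] for name in read_name_list]
-- 	outlist = list(dict.fromkeys(motifs))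
-- 	outdict = {m: [name for name, mm in zip(read_name_list, motifs) if mm == m] for m in outlist}
-- 	return outdict, outlist
-- ===== Notes on version B (the rewrite author's own statement) =====
-- stated objective: alternative
-- what changed: Staged passes replace A's single incremental loop: first map every name to its motif, then dedup that list in first-occurrence order (dict.fromkeys), then build the dict by a per-motif filter comprehension; no try/except, no mutation of a growing dict, no parallel-list bookkeeping.
import Mathlib
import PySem

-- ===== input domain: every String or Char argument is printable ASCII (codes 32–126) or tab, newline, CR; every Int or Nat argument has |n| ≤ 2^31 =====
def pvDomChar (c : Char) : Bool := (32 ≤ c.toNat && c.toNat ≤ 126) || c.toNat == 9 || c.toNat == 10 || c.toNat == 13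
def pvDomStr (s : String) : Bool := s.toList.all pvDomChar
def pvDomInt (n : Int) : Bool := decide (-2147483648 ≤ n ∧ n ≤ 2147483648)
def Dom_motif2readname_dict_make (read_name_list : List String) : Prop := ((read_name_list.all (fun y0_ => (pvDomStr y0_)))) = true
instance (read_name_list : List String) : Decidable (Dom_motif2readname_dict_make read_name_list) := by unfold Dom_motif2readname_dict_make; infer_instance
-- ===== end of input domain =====

-- B replaces A's single incremental dict+parallel-list loop by staged passes: map names to motifs,
-- dedup the motif list in first-occurrence order, then a per-motif filter comprehension (objective: alternative).

-- Shared helper: name.split("_")[0]. The separator "_" is non-empty, so PySem.Str.split? is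
-- always `some` and its result non-empty, so `.getD []` / index 0 with default "" never fire.
def pvMotifOf (name : String) : String :=
  PySem.List.pyGetD (((PySem.Str.split? name "_").getD [])) 0 ""

-- ===== PORT A =====
-- A: dict + parallel list; on KeyError insert a singleton and record the new motif.
def motif2readname_dict_make (read_name_list : List String) : (List (String × List String)) × List String :=
  let r := read_name_list.foldl
    (fun (st : PySem.Dict String (List String) × List String) name =>
      let motif := pvMotifOf name
      if st.1.contains motif then
        -- try: outdict[motif].append(name)
        (st.1.modify motif [] (fun v => v ++ [name]), st.2)
      else
        -- except: outdict[motif] = [name]; outlist.append(motif)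
        (st.1.insert motif [name], st.2 ++ [motif]))
    (PySem.Dict.empty, [])
  (r.1.items, r.2)

-- ===== PORT B =====
-- B: motifs = [name.split("_")[0] …]; outlist = list(dict.fromkeys(motifs)); dict comprehension
-- {m: [name for name, mm in zip(read_name_list, motifs) if mm == m] for m in outlist}.
def motif2readname_dict_make_alt (read_name_list : List String) : (List (String × List String)) × List String :=
  let motifs := read_name_list.map pvMotifOf
  let outlist := PySem.List.dedup motifs
  let outdict := outlist.foldl
    (fun (d : PySem.Dict String (List String)) m =>
      d.insert m (((read_name_list.zip motifs).filter (fun p => p.2 == m)).map (·.1)))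
    PySem.Dict.empty
  (outdict.items, outlist)

-- ===== PRECONDITION & SPEC =====
def Spec_motif2readname_dict_make (read_name_list : List String) (out : (List (String × List String)) × List String) : Prop := out = motif2readname_dict_make_alt read_name_list
instance (read_name_list : List String) (out : (List (String × List String)) × List String) : Decidable (Spec_motif2readname_dict_make read_name_list out) := by unfold Spec_motif2readname_dict_make; infer_instance

-- ===== CLAIM =====
def Claim_equal_motif2readname_dict_make : Prop := ∀ (read_name_list : List String), Dom_motif2readname_dict_make read_name_list → Spec_motif2readname_dict_make read_name_list (motif2readname_dict_make read_name_list)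

-- ===== LEMMAS AND PROOFS =====

-- Invariant: if the running key list equals the dict's keys, A's fold state is (D, D.keys)
-- where D is the plain grouping fold d.modify (pvMotifOf name) [] (· ++ [name]).
lemma motif_fold_inv (xs : List String) :
    ∀ (d : PySem.Dict String (List String)) (l : List String), l = d.keys →
    xs.foldl
      (fun (st : PySem.Dict String (List String) × List String) name =>
        let motif := pvMotifOf name
        if st.1.contains motif then
          (st.1.modify motif [] (fun v => v ++ [name]), st.2)
        else
          (st.1.insert motif [name], st.2 ++ [motif]))
      (d, l)
    = (xs.foldl (fun (d : PySem.Dict String (List String)) name =>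
          d.modify (pvMotifOf name) [] (fun v => v ++ [name])) d,
       (xs.foldl (fun (d : PySem.Dict String (List String)) name =>
          d.modify (pvMotifOf name) [] (fun v => v ++ [name])) d).keys) := by
  induction xs with
  | nil => intro d l hl; simp [hl]
  | cons name rest ih =>
    intro d l hl
    simp only [List.foldl_cons]
    set motif := pvMotifOf name with hm
    by_cases h : d.contains motif
    · simp only [h, if_true]
      exact ih _ _ (by
        rw [hl, PySem.Dict.keys_modify]
        rw [PySem.Dict.keys_insert_of_contains _ _ h])
    · have hfalse : d.contains motif = false := by simpa using h
      have hmod : d.modify motif [] (fun v => v ++ [name]) = d.insert motif [name] := by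
        unfold PySem.Dict.modify
        rw [PySem.Dict.getD_of_not_contains d [] hfalse]
        rfl
      rw [hfalse]
      simp only [Bool.false_eq_true, if_false]
      rw [hmod]
      exact ih _ _ (by rw [hl, PySem.Dict.keys_insert_of_not_contains _ _ hfalse])

-- A dict with distinct keys is its key list paired with the lookups.
lemma items_eq_keys_map {κ ν : Type} [BEq κ] [LawfulBEq κ]
    (d : PySem.Dict κ ν) (d0 : ν) (h : d.keys.Nodup) :
    d.items = d.keys.map (fun k => (k, d.getD k d0)) := by
  have h1 : d.keys.map (fun k => (k, d.getD k d0))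
      = d.items.map (fun p => (p.1, d.getD p.1 d0)) := by
    simp only [PySem.Dict.keys, List.map_map]; rfl
  rw [h1]
  conv_lhs => rw [← List.map_id d.items]
  refine List.map_congr_left (fun p hp => ?_)
  have h2 := PySem.Dict.getD_of_mem_items d (k := p.1) (v := p.2) (by simpa using hp) h d0
  simp [h2]

-- zip of a list with its own map.
lemma zip_self_map {α β : Type} (xs : List α) (f : α → β) :
    xs.zip (xs.map f) = xs.map (fun a => (a, f a)) := by
  induction xs with
  | nil => rfl
  | cons a t ih => simp [ih]

-- ===== VERDICT =====
theorem motif2readname_dict_make_spec : Claim_equal_motif2readname_dict_make := by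
  intro xs _
  unfold Spec_motif2readname_dict_make motif2readname_dict_make motif2readname_dict_make_alt
  dsimp only
  rw [motif_fold_inv xs PySem.Dict.empty [] (by simp [PySem.Dict.keys_empty])]
  set D := xs.foldl (fun (d : PySem.Dict String (List String)) name =>
      d.modify (pvMotifOf name) [] (fun v => v ++ [name])) PySem.Dict.empty with hD
  have hkeys : D.keys = PySem.List.dedup (xs.map pvMotifOf) := by
    rw [hD, PySem.Dict.keys_foldl_modify_key xs pvMotifOf []
        (fun _ name => (fun v => v ++ [name])) PySem.Dict.empty]
    simp [PySem.Dict.keys_empty, PySem.Set.update_nil_left]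
  have hnodup : D.keys.Nodup := by
    rw [hkeys]; exact PySem.List.nodup_dedup (xs.map pvMotifOf)
  have hgetD : ∀ m, D.getD m [] =
      ((xs.zip (xs.map pvMotifOf)).filter (fun p => p.2 == m)).map (·.1) := by
    intro m
    have hfold : D = (xs.map (fun n => (pvMotifOf n, n))).foldl
        (fun d p => d.modify p.1 [] (fun v => v ++ [p.2])) PySem.Dict.empty := by
      rw [hD, List.foldl_map]
    rw [hfold, PySem.Dict.getD_foldl_modify_append]
    rw [zip_self_map]
    simp [List.filter_map, List.map_map, Function.comp_def]
  have hB : (((PySem.List.dedup (xs.map pvMotifOf)).foldl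
      (fun (d : PySem.Dict String (List String)) m =>
        d.insert m (((xs.zip (xs.map pvMotifOf)).filter (fun p => p.2 == m)).map (·.1)))
      PySem.Dict.empty)).items
      = (PySem.List.dedup (xs.map pvMotifOf)).map
          (fun m => (m, ((xs.zip (xs.map pvMotifOf)).filter (fun p => p.2 == m)).map (·.1))) := by
    have h2 := PySem.Dict.items_foldl_insert_fresh
        (PySem.List.dedup (xs.map pvMotifOf)) (fun m => m)
        (fun m => ((xs.zip (xs.map pvMotifOf)).filter (fun p => p.2 == m)).map (·.1))
        PySem.Dict.empty
        (fun a _ => PySem.Dict.contains_empty a)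
        (by simp)
    simpa using h2
  rw [hB]
  refine Prod.ext ?_ hkeys
  rw [items_eq_keys_map D [] hnodup, hkeys]
  exact List.map_congr_left (fun m _ => by rw [hgetD m])
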